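-- pv_equiv track=rewrite | github.com/touunix/computational-complexity | linear_complexity/task_7.py | find_widest_peak
-- ===== SOURCE A (Python) =====
-- def find_widest_peak(array: list) -> list:
--     max_width: int = 0
--     peak_start: int = 0
--     peak_end: int = 0
--
--     index: int = 1
--     total_length: int = len(array) - 1
--
--     while index < total_length:
--         if array[index] > array[index - 1] and array[index] > array[index + 1]:
--             start: int = index  # peak starts
--             while index < total_length and array[index] > array[index + 1]:
--                 index += 1  # peak continues increasing
--             end: int = index  # peaks ends
--             width: int = end - start + 1  # calculate peak width
--
--             if width > max_width:
--                 max_width: int = width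
--                 peak_start: int = start
--                 peak_end: int = end
--         else:
--             index += 1  # indicate that it is not a peak
--
--     return array[peak_start:peak_end + 1]
-- ===== SOURCE B (Python) =====
-- def find_widest_peak(array: list) -> list:
--     n = len(array)
--     # D[i] = endpoint of the maximal strictly-descending run starting at i
--     D = list(range(n))
--     for i in range(n - 2, -1, -1):
--         if array[i] > array[i + 1]:
--             D[i] = D[i + 1]
--     max_width = 0
--     peak_start = 0
--     peak_end = 0
--     for i in range(1, n - 1):
--         if array[i] > array[i - 1] and array[i] > array[i + 1]:
--             width = D[i] - i + 1
--             if width > max_width: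
--                 max_width = width
--                 peak_start = i
--                 peak_end = D[i]
--     return array[peak_start:peak_end + 1]
-- ===== Notes on version B (the rewrite author's own statement) =====
-- stated objective: alternative
-- what changed: Replaced A's intertwined two-level while loop (a shared index advanced by an inner descending-run scan) by a right-to-left precomputed table of descending-run lengths plus an independent single forward pass over all interior indices checking the peak condition.
import Mathlib
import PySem

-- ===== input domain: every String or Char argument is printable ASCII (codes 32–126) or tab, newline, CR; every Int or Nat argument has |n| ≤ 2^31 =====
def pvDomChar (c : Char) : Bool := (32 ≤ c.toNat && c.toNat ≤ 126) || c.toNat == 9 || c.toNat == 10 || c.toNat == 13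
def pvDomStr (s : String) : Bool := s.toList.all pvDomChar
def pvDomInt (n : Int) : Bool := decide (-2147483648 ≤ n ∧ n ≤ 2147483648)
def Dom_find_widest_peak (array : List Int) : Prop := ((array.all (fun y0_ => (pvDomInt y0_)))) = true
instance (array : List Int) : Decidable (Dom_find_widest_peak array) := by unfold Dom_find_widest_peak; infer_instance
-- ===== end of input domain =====

-- B replaces A's intertwined two-level while scan by a precomputed descending-run-length
-- table plus an independent forward peak pass (alternative decomposition, same cost).

-- ===== PORT A =====
-- All list accesses in A occur at indices provably in [0, len-1], so List.getD is exact
-- for Python's array[i] here.  Python's total_length = len(array)-1 is -1 on [], where the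
-- loop body never runs; Nat subtraction (length - 1 = 0) gives the same non-execution.

-- inner while: 'while index < total_length and array[index] > array[index+1]: index += 1'
def pvA_inner (arr : List Int) (n1 : Nat) (idx : Nat) : Nat :=
  if idx < n1 ∧ arr.getD idx 0 > arr.getD (idx + 1) 0 then
    pvA_inner arr n1 (idx + 1)
  else idx
termination_by n1 - idx
decreasing_by omega

-- the recursive call in the outer loop's peak branch needs 'pvA_inner moves forward'
theorem pvA_inner_ge (arr : List Int) (n1 idx : Nat) : idx ≤ pvA_inner arr n1 idx := by
  fun_induction pvA_inner with
  | case1 idx h ih => omega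
  | case2 idx h => exact Nat.le_refl idx

-- outer while loop; state (max_width, peak_start, peak_end)
def pvA_loop (arr : List Int) (n1 : Nat) (idx maxW ps pe : Nat) : Nat × Nat × Nat :=
  if h : idx < n1 then
    if hp : arr.getD idx 0 > arr.getD (idx - 1) 0 ∧ arr.getD idx 0 > arr.getD (idx + 1) 0 then
      let start := idx
      let e := pvA_inner arr n1 idx
      let w := e - start + 1
      if w > maxW then pvA_loop arr n1 e w start e
      else pvA_loop arr n1 e maxW ps pe
    else pvA_loop arr n1 (idx + 1) maxW ps pe
  else (maxW, ps, pe)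
termination_by n1 - idx
decreasing_by
  · have h2 : pvA_inner arr n1 idx = pvA_inner arr n1 (idx + 1) := by
      rw [pvA_inner, if_pos ⟨h, hp.2⟩]
    have h3 := pvA_inner_ge arr n1 (idx + 1)
    omega
  · have h2 : pvA_inner arr n1 idx = pvA_inner arr n1 (idx + 1) := by
      rw [pvA_inner, if_pos ⟨h, hp.2⟩]
    have h3 := pvA_inner_ge arr n1 (idx + 1)
    omega
  · omega

def find_widest_peak (array : List Int) : List Int :=
  let r := pvA_loop array (array.length - 1) 1 0 0 0
  PySem.List.slice array (some ((r.2.1 : Int))) (some ((r.2.2 : Int) + 1))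

-- ===== PORT B =====
-- L[i] = length of the maximal strictly-descending run starting at i
-- (Source B fills L right-to-left; this recursion is that same right-to-left pass)
def pvB_L : List Int → List Nat
  | [] => []
  | [_] => [1]
  | x :: y :: rest =>
    (if x > y then (pvB_L (y :: rest)).headD 0 + 1 else 1) :: pvB_L (y :: rest)

-- body of Source B's forward 'for i in range(1, n-1)' loop
def pvB_step (arr : List Int) (L : List Nat) (s : Nat × Nat × Nat) (i : Nat) : Nat × Nat × Nat :=
  if arr.getD i 0 > arr.getD (i - 1) 0 ∧ arr.getD i 0 > arr.getD (i + 1) 0 then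
    let w := L.getD i 0
    if w > s.1 then (w, i, i + w - 1) else s
  else s

def find_widest_peak_alt (array : List Int) : List Int :=
  let L := pvB_L array
  let r := (List.range' 1 (array.length - 2)).foldl (pvB_step array L) (0, 0, 0)
  PySem.List.slice array (some ((r.2.1 : Int))) (some ((r.2.2 : Int) + 1))

-- ===== PRECONDITION & SPEC =====
def Spec_find_widest_peak (array : List Int) (out : List Int) : Prop := out = find_widest_peak_alt array
instance (array : List Int) (out : List Int) : Decidable (Spec_find_widest_peak array out) := by unfold Spec_find_widest_peak; infer_instance

-- ===== CLAIM (what is proved, stated in full; the proofs are below) =====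
def Claim_equal_find_widest_peak : Prop := ∀ (array : List Int), Dom_find_widest_peak array → Spec_find_widest_peak array (find_widest_peak array)

-- ===== LEMMAS AND PROOFS =====

theorem pvB_L_length (arr : List Int) : (pvB_L arr).length = arr.length := by
  fun_induction pvB_L with
  | case1 => rfl
  | case2 => rfl
  | case3 x y rest ih => simp [ih]

-- characterisation of the table entries
theorem pvB_L_getD (arr : List Int) (i : Nat) (hi : i < arr.length) :
    (pvB_L arr).getD i 0 =
      if i + 1 < arr.length ∧ arr.getD i 0 > arr.getD (i + 1) 0 then
        (pvB_L arr).getD (i + 1) 0 + 1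
      else 1 := by
  induction arr using pvB_L.induct generalizing i with
  | case1 => simp at hi
  | case2 x =>
    simp at hi
    subst hi
    simp [pvB_L]
  | case3 x y rest ih =>
    match i with
    | 0 =>
      have hne : pvB_L (y :: rest) ≠ [] := by
        have := pvB_L_length (y :: rest); intro hcon; rw [hcon] at this; simp at this
      simp [pvB_L, List.getD]
      cases hL : pvB_L (y :: rest) with
      | nil => exact absurd hL hne
      | cons l ls => simp
    | i + 1 =>
      have hi' : i < (y :: rest).length := by simpa using hi
      have := ih i hi'
      simpa [pvB_L, List.getD] using this

theorem pvA_inner_eq_L (arr : List Int) :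
    ∀ idx, idx < arr.length →
      pvA_inner arr (arr.length - 1) idx + 1 = idx + (pvB_L arr).getD idx 0 := by
  intro idx
  fun_induction pvA_inner arr (arr.length - 1) idx with
  | case1 idx h ih =>
    intro hi
    have hL := pvB_L_getD arr idx hi
    rw [if_pos ⟨by omega, h.2⟩] at hL
    have := ih (by omega)
    omega
  | case2 idx h =>
    intro hi
    have hL := pvB_L_getD arr idx hi
    rw [if_neg (by intro h1; exact h ⟨by omega, h1.2⟩)] at hL
    omega

theorem pvA_inner_le (arr : List Int) (n1 : Nat) :
    ∀ idx, idx ≤ n1 → pvA_inner arr n1 idx ≤ n1 := by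
  intro idx
  fun_induction pvA_inner with
  | case1 idx h ih => intro _; exact ih (by omega)
  | case2 idx h => intro hle; simpa using hle

theorem pvA_inner_desc (arr : List Int) (n1 : Nat) :
    ∀ idx j, idx ≤ j → j < pvA_inner arr n1 idx →
      arr.getD (j + 1) 0 < arr.getD j 0 := by
  intro idx
  fun_induction pvA_inner with
  | case1 idx h ih =>
    intro j hj hlt
    rcases Nat.eq_or_lt_of_le hj with rfl | hj'
    · exact h.2
    · exact ih j hj' hlt
  | case2 idx h =>
    intro j hj hlt
    omega

-- the fold is a no-op on a block of non-peak indices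
theorem foldl_nop {α β : Type} (f : α → β → α) :
    ∀ (l : List β) (s : α), (∀ x ∈ l, ∀ t, f t x = t) → l.foldl f s = s := by
  intro l
  induction l with
  | nil => intro s _; rfl
  | cons x xs ih =>
    intro s h
    simp only [List.foldl_cons, h x (by simp)]
    exact ih s (fun y hy t => h y (by simp [hy]) t)

-- a peak at idx: stepping B's fold from idx to pvA_inner's endpoint collapses to one update
theorem pvPeak_fold (arr : List Int) (idx maxW ps pe : Nat)
    (h : idx < arr.length - 1)
    (hp : arr.getD idx 0 > arr.getD (idx - 1) 0 ∧ arr.getD idx 0 > arr.getD (idx + 1) 0) :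
    (List.range' idx (arr.length - 1 - idx)).foldl (pvB_step arr (pvB_L arr)) (maxW, ps, pe) =
    (List.range' (pvA_inner arr (arr.length - 1) idx)
        (arr.length - 1 - pvA_inner arr (arr.length - 1) idx)).foldl
      (pvB_step arr (pvB_L arr))
      (if pvA_inner arr (arr.length - 1) idx - idx + 1 > maxW
       then (pvA_inner arr (arr.length - 1) idx - idx + 1, idx, pvA_inner arr (arr.length - 1) idx)
       else (maxW, ps, pe)) := by
  set n1 := arr.length - 1 with hn1
  set e := pvA_inner arr n1 idx with he
  have hstep1 : e = pvA_inner arr n1 (idx + 1) := by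
    rw [he]; conv_lhs => rw [pvA_inner]
    rw [if_pos ⟨h, hp.2⟩]
  have hge : idx + 1 ≤ e := by
    rw [hstep1]; exact pvA_inner_ge arr n1 (idx + 1)
  have hle : e ≤ n1 := pvA_inner_le arr n1 idx (by omega)
  have hidx : idx < arr.length := by omega
  have hwL : (pvB_L arr).getD idx 0 = e - idx + 1 := by
    have hq := pvA_inner_eq_L arr idx hidx
    rw [← hn1, ← he] at hq
    omega
  have hstep : pvB_step arr (pvB_L arr) (maxW, ps, pe) idx =
      (if e - idx + 1 > maxW then (e - idx + 1, idx, e) else (maxW, ps, pe)) := by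
    rw [pvB_step, if_pos hp]
    simp only [hwL]
    have : idx + (e - idx + 1) - 1 = e := by omega
    rw [this]
  have hr : List.range' idx (n1 - idx) = idx :: List.range' (idx + 1) (n1 - idx - 1) := by
    have h1 : n1 - idx = (n1 - idx - 1) + 1 := by omega
    rw [h1, List.range'_succ]
    simp
  have hsplit : List.range' (idx + 1) (n1 - idx - 1) =
      List.range' (idx + 1) (e - idx - 1) ++ List.range' e (n1 - e) := by
    have h1 := List.range'_append (s := idx + 1) (m := e - idx - 1) (n := n1 - e) (step := 1)
    have h2 : idx + 1 + 1 * (e - idx - 1) = e := by omega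
    have h3 : (e - idx - 1) + (n1 - e) = n1 - idx - 1 := by omega
    rw [h2, h3] at h1
    simpa using h1.symm
  have hnop : ∀ x ∈ List.range' (idx + 1) (e - idx - 1), ∀ t,
      pvB_step arr (pvB_L arr) t x = t := by
    intro x hx t
    rw [List.mem_range'_1] at hx
    have hxe : x < e := by omega
    have hdesc := pvA_inner_desc arr n1 idx (x - 1) (by omega) (by omega)
    have hx1 : x - 1 + 1 = x := by omega
    rw [hx1] at hdesc
    rw [pvB_step, if_neg]
    intro hc
    exact absurd hc.1 (by omega)
  rw [hr]
  simp only [List.foldl_cons]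
  rw [hstep, hsplit, List.foldl_append, foldl_nop _ _ _ hnop]

-- A's outer loop, started anywhere, equals B's forward fold over the remaining indices
theorem pvA_loop_eq_fold (arr : List Int) :
    ∀ idx maxW ps pe,
      pvA_loop arr (arr.length - 1) idx maxW ps pe =
        (List.range' idx (arr.length - 1 - idx)).foldl
          (pvB_step arr (pvB_L arr)) (maxW, ps, pe) := by
  intro idx maxW ps pe
  fun_induction pvA_loop arr (arr.length - 1) idx maxW ps pe with
  | case4 idx maxW ps pe h =>
    have : arr.length - 1 - idx = 0 := by omega
    simp [this]
  | case3 idx maxW ps pe h hp ih =>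
    -- not a peak: step is a no-op on idx
    have hr : List.range' idx (arr.length - 1 - idx) =
        idx :: List.range' (idx + 1) (arr.length - 1 - (idx + 1)) := by
      have h1 : arr.length - 1 - idx = (arr.length - 1 - (idx + 1)) + 1 := by omega
      rw [h1, List.range'_succ]
    rw [hr]
    simp only [List.foldl_cons]
    rw [pvB_step, if_neg hp]
    exact ih
  | case1 idx maxW ps pe h hp s_ e_ w_ hw ih =>
    rw [pvPeak_fold arr idx maxW ps pe h hp, if_pos hw]
    exact ih
  | case2 idx maxW ps pe h hp s_ e_ w_ hw ih =>
    rw [pvPeak_fold arr idx maxW ps pe h hp, if_neg hw]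
    exact ih

-- ===== VERDICT (by name: the statement is the Claim_ definition above) =====
theorem find_widest_peak_spec : Claim_equal_find_widest_peak := by
  intro array _
  unfold Spec_find_widest_peak find_widest_peak find_widest_peak_alt
  have h := pvA_loop_eq_fold array 1 0 0 0
  have h2 : array.length - 1 - 1 = array.length - 2 := by omega
  rw [h2] at h
  rw [h]
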